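-- pv_equiv track=rewrite | github.com/GrafikXxxxxxxYyyyyyyyyyy/YggDrasil | yggdrasill/engine/planner.py | _topo_sort_sccs
-- ===== SOURCE A (Python) =====
-- import bisect
-- from typing import Any, Dict, List, Optional, Set, Tuple
--
-- def _topo_sort_sccs(
--     sccs: List[Set[str]], adj: Dict[str, Set[str]],
-- ) -> List[Set[str]]:
--     """Topologically sort SCCs (sources first)."""
--     scc_of: Dict[str, int] = {}
--     for i, comp in enumerate(sccs):
--         for nid in comp:
--             scc_of[nid] = i
--
--     n = len(sccs)
--     scc_adj: Dict[int, Set[int]] = {i: set() for i in range(n)}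
--     in_deg: Dict[int, int] = {i: 0 for i in range(n)}
--
--     for src, targets in adj.items():
--         si = scc_of.get(src)
--         if si is None:
--             continue
--         for tgt in targets:
--             ti = scc_of.get(tgt)
--             if ti is None or ti == si:
--                 continue
--             if ti not in scc_adj[si]:
--                 scc_adj[si].add(ti)
--                 in_deg[ti] += 1
--
--     queue = sorted([i for i in range(n) if in_deg[i] == 0])
--     order: List[int] = []
--     while queue:
--         cur = queue.pop(0)
--         order.append(cur)
--         for nxt in sorted(scc_adj[cur]):
--             in_deg[nxt] -= 1
--             if in_deg[nxt] == 0: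
--                 bisect.insort(queue, nxt)
--
--     return [sccs[i] for i in order]
-- ===== SOURCE B (Python) =====
-- def _topo_sort_sccs(sccs, adj):
--     """Kahn-style topological sort of the SCC condensation (sources first,
--     smallest index first), using a flat edge set, array in-degrees and a
--     linear scan for the next ready component instead of a maintained
--     sorted queue."""
--     scc_of = {nid: i for i, comp in enumerate(sccs) for nid in comp}
--     n = len(sccs)
--     edges = {(si, ti) for u, ts in adj.items() if (si := scc_of.get(u)) is not None
--              for v in ts if (ti := scc_of.get(v)) is not None and ti != si}
--     indeg = [0] * n
--     succ = [[] for _ in range(n)]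
--     for s, t in edges:
--         indeg[t] += 1
--         succ[s].append(t)
--     order = []
--     done = [False] * n
--     while True:
--         cur = next((i for i in range(n) if not done[i] and indeg[i] == 0), None)
--         if cur is None:
--             break
--         done[cur] = True
--         order.append(cur)
--         for t in succ[cur]:
--             indeg[t] -= 1
--     return [sccs[i] for i in order]
-- ===== Notes on version B (the rewrite author's own statement) =====
-- stated objective: alternative
-- what changed: Replaces the maintained sorted ready-queue (bisect.insort + pop(0) + per-node sorting of successor sets) and per-source adjacency/in-degree dicts with a flat deduplicated edge set, array-based in-degrees/successor lists, and a plain linear scan for the smallest ready component each round.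
import Mathlib
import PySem

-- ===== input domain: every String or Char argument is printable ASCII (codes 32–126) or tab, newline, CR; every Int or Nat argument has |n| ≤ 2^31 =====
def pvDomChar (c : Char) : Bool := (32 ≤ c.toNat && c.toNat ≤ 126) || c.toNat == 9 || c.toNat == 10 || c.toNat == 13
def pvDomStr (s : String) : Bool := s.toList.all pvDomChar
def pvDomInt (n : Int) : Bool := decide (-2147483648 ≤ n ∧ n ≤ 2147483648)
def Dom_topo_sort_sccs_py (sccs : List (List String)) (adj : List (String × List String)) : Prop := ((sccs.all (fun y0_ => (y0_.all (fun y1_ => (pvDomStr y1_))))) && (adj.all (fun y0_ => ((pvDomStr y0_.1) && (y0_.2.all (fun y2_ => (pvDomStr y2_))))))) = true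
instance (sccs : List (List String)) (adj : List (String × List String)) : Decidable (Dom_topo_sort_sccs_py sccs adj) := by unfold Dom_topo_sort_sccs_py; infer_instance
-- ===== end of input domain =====

-- B's change (one line): same topological order of the SCC condensation, but computed from a flat
-- deduplicated edge set with array in-degrees and a linear scan for the smallest ready component,
-- instead of A's per-source adjacency dicts with a bisect-maintained sorted queue.

-- ===== PORT A =====
-- scc_of = {nid: i} built by the nested loops over enumerate(sccs)
def pvSccOf (sccs : List (List String)) : PySem.Dict String Int :=
  (PySem.List.enumerate sccs).foldl
    (fun d ic => ic.2.foldl (fun d nid => d.insert nid ic.1) d) PySem.Dict.empty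

-- bisect.insort on a list of ints (insert after existing equal elements) — hand port, exact
def pvInsort (xs : List Int) (x : Int) : List Int :=
  match xs with
  | [] => [x]
  | y :: ys => if x < y then x :: y :: ys else y :: pvInsort ys x

-- body of A's 'for src, targets in adj.items()' loop (scc_adj[si] / in_deg[ti] are always
-- present keys — values of scc_of lie in range(n) — so getD is exact here)
def pvCondStep (sccOf : PySem.Dict String Int)
    (st : PySem.Dict Int (PySem.Set Int) × PySem.Dict Int Int) (p : String × List String) :
    PySem.Dict Int (PySem.Set Int) × PySem.Dict Int Int :=
  match sccOf.get? p.1 with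
  | none => st
  | some si => p.2.foldl (fun st tgt =>
      match sccOf.get? tgt with
      | none => st
      | some ti =>
        if ti = si then st
        else if PySem.Set.contains (st.1.getD si PySem.Set.empty) ti then st
        else (st.1.insert si (PySem.Set.add (st.1.getD si PySem.Set.empty) ti),
              st.2.insert ti (st.2.getD ti 0 + 1))) st

-- A's 'while queue:' loop; fuel = len(sccs)+1 suffices (each iteration pops one component,
-- every popped index is distinct and in range(n), so there are at most n iterations)
def pvALoop (sa : PySem.Dict Int (PySem.Set Int)) :
    Nat → PySem.Dict Int Int → List Int → List Int → List Int
  | 0, _, _, order => order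
  | fuel+1, deg, queue, order =>
    match queue with
    | [] => order
    | cur :: rest =>
      let st := (PySem.List.sorted (sa.getD cur PySem.Set.empty) (fun x => x) false).foldl
        (fun (st : PySem.Dict Int Int × List Int) nxt =>
          let d := st.1.insert nxt (st.1.getD nxt 0 - 1)
          if d.getD nxt 0 == 0 then (d, pvInsort st.2 nxt) else (d, st.2)) (deg, rest)
      pvALoop sa fuel st.1 st.2 (order ++ [cur])

def topo_sort_sccs_py (sccs : List (List String)) (adj : List (String × List String)) : List (List String) :=
  let sccOf := pvSccOf sccs
  let n : Int := (sccs.length : Int)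
  let sa0 : PySem.Dict Int (PySem.Set Int) :=
    (PySem.List.pyRange 0 n 1).foldl (fun d i => d.insert i PySem.Set.empty) PySem.Dict.empty
  let id0 : PySem.Dict Int Int :=
    (PySem.List.pyRange 0 n 1).foldl (fun d i => d.insert i 0) PySem.Dict.empty
  let st := adj.foldl (pvCondStep sccOf) (sa0, id0)
  let queue := PySem.List.sorted
    ((PySem.List.pyRange 0 n 1).filter (fun i => st.2.getD i 0 == 0)) (fun x => x) false
  let order := pvALoop st.1 (sccs.length + 1) st.2 queue []
  order.map (fun i => PySem.List.pyGetD sccs i [])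

-- ===== PORT B =====
-- B's dict comprehension {nid: i for i, comp in enumerate(sccs) for nid in comp} is the very
-- same fold as A's nested loops, so the helper pvSccOf is shared.
-- B's edge-set comprehension
def pvEdges (sccOf : PySem.Dict String Int) (adj : List (String × List String)) :
    PySem.Set (Int × Int) :=
  adj.foldl (fun es p =>
    match sccOf.get? p.1 with
    | none => es
    | some si => p.2.foldl (fun es v =>
        match sccOf.get? v with
        | none => es
        | some ti => if ti = si then es else PySem.Set.add es (si, ti)) es)
    PySem.Set.empty

-- B's 'while True:' scan loop; fuel = n+1 suffices (each round marks one fresh index done,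
-- so at most n rounds find a candidate).  All list indices are in range, so pySetD/pyGetD are exact.
def pvBLoop (succ : List (List Int)) (n : Int) :
    Nat → List Int → List Bool → List Int → List Int
  | 0, _, _, order => order
  | fuel+1, indeg, done, order =>
    match (PySem.List.pyRange 0 n 1).find? (fun i =>
        !(PySem.List.pyGetD done i false) && (PySem.List.pyGetD indeg i 0 == 0)) with
    | none => order
    | some cur =>
      pvBLoop succ n fuel
        ((PySem.List.pyGetD succ cur []).foldl
          (fun dg t => PySem.List.pySetD dg t (PySem.List.pyGetD dg t 0 - 1)) indeg)
        (PySem.List.pySetD done cur true)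
        (order ++ [cur])

def topo_sort_sccs_py_alt (sccs : List (List String)) (adj : List (String × List String)) : List (List String) :=
  let sccOf := pvSccOf sccs
  let n : Int := (sccs.length : Int)
  let es := pvEdges sccOf adj
  let st := es.foldl (fun (st : List Int × List (List Int)) e =>
      (PySem.List.pySetD st.1 e.2 (PySem.List.pyGetD st.1 e.2 0 + 1),
       PySem.List.pySetD st.2 e.1 (PySem.List.pyGetD st.2 e.1 [] ++ [e.2])))
    (List.replicate sccs.length 0, List.replicate sccs.length [])
  let order := pvBLoop st.2 n (sccs.length + 1) st.1 (List.replicate sccs.length false) []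
  order.map (fun i => PySem.List.pyGetD sccs i [])

-- ===== PRECONDITION & SPEC =====
def Spec_topo_sort_sccs_py (sccs : List (List String)) (adj : List (String × List String)) (out : List (List String)) : Prop := out = topo_sort_sccs_py_alt sccs adj
instance (sccs : List (List String)) (adj : List (String × List String)) (out : List (List String)) : Decidable (Spec_topo_sort_sccs_py sccs adj out) := by unfold Spec_topo_sort_sccs_py; infer_instance

-- ===== CLAIM (what is proved, stated in full; the proofs are below) =====
def Claim_equal_topo_sort_sccs_py : Prop := ∀ (sccs : List (List String)) (adj : List (String × List String)), Dom_topo_sort_sccs_py sccs adj → Spec_topo_sort_sccs_py sccs adj (topo_sort_sccs_py sccs adj)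

-- ===== LEMMAS AND PROOFS =====

-- The common abstract middle loop both loops are proved equal to: state is the pure in-degree
-- function and the order built so far; the next component is the least unfinished zero-in-degree index.
def pvMLoop (E : List (Int × Int)) (n : Int) :
    Nat → (Int → Int) → List Int → List Int
  | 0, _, order => order
  | fuel+1, deg, order =>
    match (PySem.List.pyRange 0 n 1).find? (fun i => decide (i ∉ order) && (deg i == 0)) with
    | none => order
    | some cur => pvMLoop E n fuel (fun t => if (cur, t) ∈ E then deg t - 1 else deg t) (order ++ [cur])

lemma pv_foldl_pres {gam sig : Type} (P : sig → Prop) (f : sig → gam → sig) (l : List gam)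
    (h : ∀ s x, x ∈ l → P s → P (f s x)) : ∀ s, P s → P (l.foldl f s) := by
  induction l with
  | nil => intro s hs; exact hs
  | cons a l ih =>
    intro s hs
    exact ih (fun s x hx => h s x (List.mem_cons_of_mem _ hx)) (f s a) (h s a List.mem_cons_self hs)

lemma pv_ins_fold_values (P : Int → Prop) (ns : List String) :
    ∀ (d : PySem.Dict String Int) (c : Int), (∀ x v, d.get? x = some v → P v) → P c →
    ∀ x v, (ns.foldl (fun d nid => d.insert nid c) d).get? x = some v → P v := by
  induction ns with
  | nil => intro d c hd _ x v h; exact hd x v h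
  | cons a ns ih =>
    intro d c hd hc x v h
    refine ih (d.insert a c) c ?_ hc x v h
    intro x' v' h'
    rw [PySem.Dict.get?_insert] at h'
    split at h'
    · cases h'; exact hc
    · exact hd _ _ h'

lemma pv_enum_fold_values (P : Int → Prop) (l : List (Int × List String)) :
    ∀ (d : PySem.Dict String Int), (∀ x v, d.get? x = some v → P v) → (∀ p ∈ l, P p.1) →
    ∀ x v, (l.foldl (fun d ic => ic.2.foldl (fun d nid => d.insert nid ic.1) d) d).get? x = some v → P v := by
  induction l with
  | nil => intro d hd _ x v h; exact hd x v h
  | cons p l ih =>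
    intro d hd hl x v h
    refine ih _ ?_ (fun q hq => hl q (List.mem_cons_of_mem _ hq)) x v h
    exact pv_ins_fold_values P p.2 d p.1 hd (hl p List.mem_cons_self)

-- values of scc_of lie in [0, len sccs)
lemma pvSccOf_values (sccs : List (List String)) (x : String) (v : Int)
    (h : (pvSccOf sccs).get? x = some v) : 0 ≤ v ∧ v < (sccs.length : Int) := by
  
  refine pv_enum_fold_values (fun v => 0 ≤ v ∧ v < (sccs.length : Int)) _ PySem.Dict.empty ?_ ?_ x v h
  · intro x' v' h'; rw [PySem.Dict.get?_empty] at h'; cases h'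
  · intro p hp
    rw [PySem.List.mem_enumerate_iff] at hp
    obtain ⟨k, hk, rfl⟩ := hp
    constructor <;> simp <;> omega

-- pvInsort
lemma mem_pvInsort (xs : List Int) (x i : Int) : i ∈ pvInsort xs x ↔ i = x ∨ i ∈ xs := by
  induction xs with
  | nil => simp [pvInsort]
  | cons y ys ih =>
    simp only [pvInsort]
    split
    · simp [or_left_comm]
    · simp [ih, or_left_comm]

lemma pairwise_pvInsort (xs : List Int) (x : Int) (h : xs.Pairwise (· < ·)) (hx : x ∉ xs) :
    (pvInsort xs x).Pairwise (· < ·) := by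
  induction xs with
  | nil => simp [pvInsort]
  | cons y ys ih =>
    simp only [pvInsort]
    have hxy : x ≠ y := by intro h; exact hx (h ▸ List.mem_cons_self)
    have hxys : x ∉ ys := fun h' => hx (List.mem_cons_of_mem _ h')
    rcases List.pairwise_cons.mp h with ⟨hy, hys⟩
    split
    · rename_i hlt
      exact List.pairwise_cons.mpr ⟨by
        intro z hz
        rcases List.mem_cons.mp hz with rfl | hz
        · exact hlt
        · exact lt_trans hlt (hy z hz), h⟩
    · rename_i hnlt
      have hyx : y < x := lt_of_le_of_ne (not_lt.mp hnlt) (Ne.symm hxy)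
      refine List.pairwise_cons.mpr ⟨?_, ih hys hxys⟩
      intro z hz
      rcases (mem_pvInsort ys x z).mp hz with rfl | hz
      · exact hyx
      · exact hy z hz

-- getD through a fold of constant inserts
lemma pv_getD_fold_const {ν : Type} (l : List Int) (d : PySem.Dict Int ν) (v : ν)
    (h : ∀ c, d.getD c v = v) (c : Int) :
    (l.foldl (fun d i => d.insert i v) d).getD c v = v := by
  induction l generalizing d with
  | nil => exact h c
  | cons i l ih =>
    simp only [List.foldl_cons]
    exact ih (d.insert i v) (fun c' => by rw [PySem.Dict.getD_insert]; split <;> [rfl; exact h c'])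

-- generic: pyGetD/pySetD with an in-range Int index
lemma pv_getD_setD {α : Type} (xs : List α) (i j : Int) (v d : α)
    (h0 : 0 ≤ i) (h1 : i < (xs.length : Int)) (hj : 0 ≤ j) :
    PySem.List.pyGetD (PySem.List.pySetD xs i v) j d = if j = i then v else PySem.List.pyGetD xs j d := by
  obtain ⟨k, rfl⟩ : ∃ k : Nat, i = (k : Int) := ⟨i.toNat, (Int.toNat_of_nonneg h0).symm⟩
  obtain ⟨m, rfl⟩ : ∃ m : Nat, j = (m : Int) := ⟨j.toNat, (Int.toNat_of_nonneg hj).symm⟩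
  have hk : k < xs.length := by exact_mod_cast h1
  rw [PySem.List.pyGetD_pySetD_natCast xs k m v d hk]
  simp [Nat.cast_inj]

lemma pv_getD_replicate {α : Type} (n : Nat) (v : α) (j : Int) (hj : 0 ≤ j) :
    PySem.List.pyGetD (List.replicate n v) j v = v := by
  obtain ⟨m, rfl⟩ : ∃ m : Nat, j = (m : Int) := ⟨j.toNat, (Int.toNat_of_nonneg hj).symm⟩
  rw [PySem.List.pyGetD_natCast]
  simp only [List.getD, List.getElem?_replicate]
  split <;> simp

-- relation between A's condensation state and the edge list
def pvRsa (sa : PySem.Dict Int (PySem.Set Int)) (es : List (Int × Int)) : Prop :=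
  ∀ c, sa.getD c PySem.Set.empty = (es.filter (fun e => e.1 == c)).map (·.2)

def pvRid (id : PySem.Dict Int Int) (es : List (Int × Int)) : Prop :=
  ∀ t, id.getD t 0 = (es.countP (fun e => e.2 == t) : Int)

lemma pv_mem_filter_map (es : List (Int × Int)) (c t : Int) :
    t ∈ (es.filter (fun e => e.1 == c)).map (·.2) ↔ (c, t) ∈ es := by
  
  constructor
  · intro h
    simp only [List.mem_map, List.mem_filter] at h
    obtain ⟨e, ⟨he, hfst⟩, hsnd⟩ := h
    have h1 : e.1 = c := by simpa using hfst
    have : e = (c, t) := by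
      cases e; simp_all
    exact this ▸ he
  · intro h
    simp only [List.mem_map, List.mem_filter]
    exact ⟨(c, t), ⟨h, by simp⟩, rfl⟩

lemma pvCond_inner (sccOf : PySem.Dict String Int) (si : Int) (ts : List String) :
    ∀ (sa : PySem.Dict Int (PySem.Set Int)) (id : PySem.Dict Int Int) (es : PySem.Set (Int × Int)),
    pvRsa sa es → pvRid id es →
    pvRsa (ts.foldl (fun st tgt =>
        match sccOf.get? tgt with
        | none => st
        | some ti =>
          if ti = si then st
          else if PySem.Set.contains (st.1.getD si PySem.Set.empty) ti then st
          else (st.1.insert si (PySem.Set.add (st.1.getD si PySem.Set.empty) ti),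
                st.2.insert ti (st.2.getD ti 0 + 1)))
      ((sa, id) : PySem.Dict Int (PySem.Set Int) × PySem.Dict Int Int)).1
      (ts.foldl (fun es v =>
        match sccOf.get? v with
        | none => es
        | some ti => if ti = si then es else PySem.Set.add es (si, ti)) es) ∧
    pvRid (ts.foldl (fun st tgt =>
        match sccOf.get? tgt with
        | none => st
        | some ti =>
          if ti = si then st
          else if PySem.Set.contains (st.1.getD si PySem.Set.empty) ti then st
          else (st.1.insert si (PySem.Set.add (st.1.getD si PySem.Set.empty) ti),
                st.2.insert ti (st.2.getD ti 0 + 1)))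
      ((sa, id) : PySem.Dict Int (PySem.Set Int) × PySem.Dict Int Int)).2
      (ts.foldl (fun es v =>
        match sccOf.get? v with
        | none => es
        | some ti => if ti = si then es else PySem.Set.add es (si, ti)) es) := by
  induction ts with
  | nil => intro sa id es hsa hid; exact ⟨hsa, hid⟩
  | cons a ts ih =>
    intro sa id es hsa hid
    simp only [List.foldl_cons]
    rcases hg : sccOf.get? a with _ | ti
    · simp only [hg]
      exact ih sa id es hsa hid
    · simp only [hg]
      by_cases hts : ti = si
      · simp only [hts, if_pos rfl]
        exact ih sa id es hsa hid
      · simp only [if_neg hts]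
        have hmemiff : PySem.Set.contains (sa.getD si PySem.Set.empty) ti = true ↔ (si, ti) ∈ es := by
          rw [PySem.Set.contains_iff, hsa si, pv_mem_filter_map]
        by_cases hc : (si, ti) ∈ es
        · have h1 : PySem.Set.contains (sa.getD si PySem.Set.empty) ti = true := hmemiff.mpr hc
          have h2 : PySem.Set.add es (si, ti) = es := PySem.Set.add_of_mem hc
          rw [if_pos h1, h2]
          exact ih sa id es hsa hid
        · have h1 : PySem.Set.contains (sa.getD si PySem.Set.empty) ti = false := by
            rw [Bool.eq_false_iff]; intro hcontra; exact hc (hmemiff.mp hcontra)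
          have h2 : PySem.Set.add es (si, ti) = es ++ [(si, ti)] := PySem.Set.add_of_not_mem hc
          have hnm : ti ∉ sa.getD si PySem.Set.empty := fun hm => by
            rw [(PySem.Set.contains_iff _ _).mpr hm] at h1; cases h1
          have hadd : PySem.Set.add (sa.getD si PySem.Set.empty) ti = sa.getD si PySem.Set.empty ++ [ti] :=
            PySem.Set.add_of_not_mem hnm
          rw [if_neg (ne_true_of_eq_false h1), h2]
          refine ih _ _ _ ?_ ?_
          · intro c
            rw [PySem.Dict.getD_insert]
            by_cases hcsi : c = si
            · subst hcsi
              rw [if_pos rfl, hadd, hsa c, List.filter_append, List.map_append]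
              simp
            · rw [if_neg hcsi, hsa c, List.filter_append, List.map_append]
              have : ((si, ti).1 == c) = false := by simpa using fun h => hcsi h.symm
              simp [this]
          · intro t
            rw [PySem.Dict.getD_insert]
            by_cases hti : t = ti
            · subst hti
              rw [if_pos rfl, hid t, List.countP_append]
              simp
            · rw [if_neg hti, hid t, List.countP_append]
              have : ((si, ti).2 == t) = false := by simpa using fun h => hti h.symm
              simp [this]

lemma pvCond_char (sccOf : PySem.Dict String Int) (adj : List (String × List String))
    (sa : PySem.Dict Int (PySem.Set Int)) (id : PySem.Dict Int Int) (es : PySem.Set (Int × Int))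
    (hsa : pvRsa sa es) (hid : pvRid id es) :
    pvRsa (adj.foldl (pvCondStep sccOf) (sa, id)).1
        (adj.foldl (fun es p =>
          match sccOf.get? p.1 with
          | none => es
          | some si => p.2.foldl (fun es v =>
              match sccOf.get? v with
              | none => es
              | some ti => if ti = si then es else PySem.Set.add es (si, ti)) es) es) ∧
    pvRid (adj.foldl (pvCondStep sccOf) (sa, id)).2
        (adj.foldl (fun es p =>
          match sccOf.get? p.1 with
          | none => es
          | some si => p.2.foldl (fun es v =>
              match sccOf.get? v with
              | none => es
              | some ti => if ti = si then es else PySem.Set.add es (si, ti)) es) es) := by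
  
  induction adj generalizing sa id es with
  | nil => exact ⟨hsa, hid⟩
  | cons p adj ih =>
    simp only [List.foldl_cons]
    show pvRsa (adj.foldl (pvCondStep sccOf) (pvCondStep sccOf (sa, id) p)).1 _ ∧ _
    rcases hg : sccOf.get? p.1 with _ | si
    · simp only [pvCondStep, hg]
      exact ih sa id es hsa hid
    · simp only [pvCondStep, hg]
      obtain ⟨hA, hB⟩ := pvCond_inner sccOf si p.2 sa id es hsa hid
      have := ih _ _ _ hA hB
      simpa using this

lemma pv_set_add_nodup {α : Type} [BEq α] [LawfulBEq α] (s : PySem.Set α) (x : α)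
    (h : s.Nodup) : (PySem.Set.add s x).Nodup := by
  by_cases hx : x ∈ s
  · rw [PySem.Set.add_of_mem hx]; exact h
  · rw [PySem.Set.add_of_not_mem hx]
    have hdisj : ∀ a ∈ s, ∀ b ∈ [x], a ≠ b := by
      intro a haa b hb
      rw [List.mem_singleton] at hb
      subst hb
      exact fun hax => hx (hax ▸ haa)
    exact (List.nodup_append).mpr ⟨h, List.nodup_singleton x, hdisj⟩

lemma pvEdges_nodup (sccOf : PySem.Dict String Int) (adj : List (String × List String)) :
    (pvEdges sccOf adj).Nodup := by
  
  unfold pvEdges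
  refine pv_foldl_pres (fun es : PySem.Set (Int × Int) => es.Nodup) _ adj ?_ PySem.Set.empty
    (show ([] : List (Int × Int)).Nodup from List.nodup_nil)
  intro es p _ hnd
  rcases hg : sccOf.get? p.1 with _ | si
  · simpa [hg] using hnd
  · simp only [hg]
    refine pv_foldl_pres (fun es : PySem.Set (Int × Int) => es.Nodup) _ p.2 ?_ es hnd
    intro es' v _ hnd'
    rcases hg2 : sccOf.get? v with _ | ti
    · simpa [hg2] using hnd'
    · simp only [hg2]
      split
      · exact hnd'
      · exact pv_set_add_nodup es' (si, ti) hnd' 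

lemma pvEdges_mem (sccs : List (List String)) (adj : List (String × List String))
    (e : Int × Int) (h : e ∈ pvEdges (pvSccOf sccs) adj) :
    0 ≤ e.1 ∧ e.1 < (sccs.length : Int) ∧ 0 ≤ e.2 ∧ e.2 < (sccs.length : Int) ∧ e.1 ≠ e.2 := by
  
  revert e
  show ∀ e ∈ pvEdges (pvSccOf sccs) adj, _
  unfold pvEdges
  refine pv_foldl_pres (fun es : PySem.Set (Int × Int) => ∀ e ∈ es, 0 ≤ e.1 ∧ e.1 < (sccs.length : Int) ∧ 0 ≤ e.2 ∧ e.2 < (sccs.length : Int) ∧ e.1 ≠ e.2) _ adj ?_ PySem.Set.empty (by intro e he; cases he)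
  intro es p _ hP
  rcases hg : pvSccOf sccs |>.get? p.1 with _ | si
  · simpa [hg] using hP
  · simp only [hg]
    refine pv_foldl_pres (fun es : PySem.Set (Int × Int) => ∀ e ∈ es, 0 ≤ e.1 ∧ e.1 < (sccs.length : Int) ∧ 0 ≤ e.2 ∧ e.2 < (sccs.length : Int) ∧ e.1 ≠ e.2) _ p.2 ?_ es hP
    intro es' v _ hP'
    rcases hg2 : pvSccOf sccs |>.get? v with _ | ti
    · simpa [hg2] using hP'
    · simp only [hg2]
      split
      · exact hP'
      · rename_i hne
        intro e he
        rcases (PySem.Set.mem_add es' (si, ti) e).mp he with he' | rfl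
        · exact hP' e he'
        · obtain ⟨h1, h2⟩ := pvSccOf_values sccs p.1 si hg
          obtain ⟨h3, h4⟩ := pvSccOf_values sccs v ti hg2
          exact ⟨h1, h2, h3, h4, fun hh => hne hh.symm⟩

lemma pv_countP_sub (E : List (Int × Int)) (q : Int × Int → Bool) (x : Int × Int)
    (hx : q x = true) (hnd : E.Nodup) :
    (E.countP (fun e => q e && !(e == x)) : Int)
      = (E.countP q : Int) - (if x ∈ E then 1 else 0) := by
  induction E with
  | nil => simp
  | cons a E ih =>
    obtain ⟨ha, hE⟩ := List.nodup_cons.mp hnd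
    have hIH := ih hE
    by_cases hax : a = x
    · obtain rfl := hax
      have hL : List.countP (fun e => q e && !(e == a)) (a :: E) = List.countP (fun e => q e && !(e == a)) E := by
        simp [List.countP_cons]
      have hR : List.countP q (a :: E) = List.countP q E + 1 := by
        simp [hx]
      rw [hL, hR, if_pos (show a ∈ a :: E from List.mem_cons_self)]
      rw [if_neg ha] at hIH
      push_cast at hIH ⊢
      omega
    · have hne : (a == x) = false := beq_eq_false_iff_ne.mpr hax
      have hpa : (q a && !(a == x)) = q a := by rw [hne]; simp
      simp only [List.countP_cons, hpa]
      have hmm : (x ∈ a :: E) ↔ (x ∈ E) :=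
        ⟨fun h => (List.mem_cons.mp h).resolve_left (fun h' => hax h'.symm), List.mem_cons_of_mem a⟩
      by_cases hxE : x ∈ E
      · rw [if_pos (hmm.mpr hxE)]
        rw [if_pos hxE] at hIH
        by_cases hqa : q a = true
        · rw [if_pos hqa]; push_cast at hIH ⊢; omega
        · rw [if_neg hqa]; push_cast at hIH ⊢; omega
      · rw [if_neg (fun h => hxE (hmm.mp h))]
        rw [if_neg hxE] at hIH
        by_cases hqa : q a = true
        · rw [if_pos hqa]; push_cast at hIH ⊢; omega
        · rw [if_neg hqa]; push_cast at hIH ⊢; omega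

lemma pv_find?_congr {α : Type} (l : List α) (p q : α → Bool) (h : ∀ x ∈ l, p x = q x) :
    l.find? p = l.find? q := by
  
  induction l with
  | nil => rfl
  | cons a l ih =>
    simp only [List.find?_cons]
    rw [h a List.mem_cons_self]
    split
    · rfl
    · exact ih (fun x hx => h x (List.mem_cons_of_mem _ hx))

lemma pv_find?_pyRange_least (n : Int) (p : Int → Bool) (m : Int)
    (h0 : 0 ≤ m) (h1 : m < n) (hp : p m = true)
    (hmin : ∀ j, 0 ≤ j → j < m → p j = false) :
    (PySem.List.pyRange 0 n 1).find? p = some m := by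
  
  have hsplit : PySem.List.pyRange 0 n 1 = PySem.List.pyRange 0 m 1 ++ PySem.List.pyRange m n 1 :=
    PySem.List.pyRange_one_append 0 m n h0 (le_of_lt h1)
  rw [hsplit, List.find?_append]
  have hnone : (PySem.List.pyRange 0 m 1).find? p = none := by
    rw [List.find?_eq_none]
    intro x hx
    rw [PySem.List.mem_pyRange_one] at hx
    simp [hmin x hx.1 hx.2]
  rw [hnone, Option.none_or, PySem.List.pyRange_one_cons h1, List.find?_cons, hp]

-- A's inner decrement-and-insort fold
lemma pvAStep_fold (S : List Int) :
    ∀ (dg : PySem.Dict Int Int) (q : List Int),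
    S.Nodup → q.Pairwise (· < ·) → (∀ t ∈ S, t ∉ q) →
    (∀ t, (S.foldl (fun (st : PySem.Dict Int Int × List Int) nxt =>
          let d := st.1.insert nxt (st.1.getD nxt 0 - 1)
          if d.getD nxt 0 == 0 then (d, pvInsort st.2 nxt) else (d, st.2)) (dg, q)).1.getD t 0
        = if t ∈ S then dg.getD t 0 - 1 else dg.getD t 0) ∧
    ((S.foldl (fun (st : PySem.Dict Int Int × List Int) nxt =>
          let d := st.1.insert nxt (st.1.getD nxt 0 - 1)
          if d.getD nxt 0 == 0 then (d, pvInsort st.2 nxt) else (d, st.2)) (dg, q)).2.Pairwise (· < ·)) ∧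
    (∀ i, i ∈ (S.foldl (fun (st : PySem.Dict Int Int × List Int) nxt =>
          let d := st.1.insert nxt (st.1.getD nxt 0 - 1)
          if d.getD nxt 0 == 0 then (d, pvInsort st.2 nxt) else (d, st.2)) (dg, q)).2
        ↔ (i ∈ q ∨ (i ∈ S ∧ dg.getD i 0 = 1))) := by
  
  induction S with
  | nil =>
    intro dg q _ hq _
    exact ⟨fun t => by simp, hq, fun i => by simp⟩
  | cons a S ih =>
    intro dg q hnd hq hnotin
    obtain ⟨haS, hS⟩ := List.nodup_cons.mp hnd
    have haq : a ∉ q := hnotin a List.mem_cons_self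
    have hstate : (let d := ((dg, q) : PySem.Dict Int Int × List Int).1.insert a ((dg, q).1.getD a 0 - 1);
        if (d.getD a 0 == 0) = true then (d, pvInsort (dg, q).2 a) else (d, (dg, q).2))
        = (dg.insert a (dg.getD a 0 - 1),
           if ((dg.insert a (dg.getD a 0 - 1)).getD a 0 == 0) = true then pvInsort q a else q) := by
      dsimp only
      split <;> rfl
    rw [List.foldl_cons, hstate]
    have hself : (dg.insert a (dg.getD a 0 - 1)).getD a 0 = dg.getD a 0 - 1 := by
      rw [PySem.Dict.getD_insert]; simp
    have hd1 : ∀ t, (dg.insert a (dg.getD a 0 - 1)).getD t 0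
        = if t = a then dg.getD a 0 - 1 else dg.getD t 0 := by
      intro t; rw [PySem.Dict.getD_insert]
    by_cases hz : dg.getD a 0 = 1
    · have hc : ((dg.insert a (dg.getD a 0 - 1)).getD a 0 == 0) = true := by
        rw [hself, hz]; simp
      rw [if_pos hc]
      have hq1 : (pvInsort q a).Pairwise (· < ·) := pairwise_pvInsort q a hq haq
      have hnotin1 : ∀ t ∈ S, t ∉ pvInsort q a := by
        intro t ht hmem
        rcases (mem_pvInsort q a t).mp hmem with rfl | hmem'
        · exact haS ht
        · exact hnotin t (List.mem_cons_of_mem _ ht) hmem'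
      obtain ⟨ih1, ih2, ih3⟩ := ih (dg.insert a (dg.getD a 0 - 1)) (pvInsort q a) hS hq1 hnotin1
      refine ⟨?_, ih2, ?_⟩
      · intro t
        rw [ih1 t, hd1 t]
        by_cases hta : t = a
        · subst hta; simp [haS]
        · simp [hta, List.mem_cons]
      · intro i
        rw [ih3 i, mem_pvInsort]
        constructor
        · rintro ((rfl | hi) | ⟨hiS, hdi⟩)
          · exact Or.inr ⟨List.mem_cons_self, hz⟩
          · exact Or.inl hi
          · have hia : i ≠ a := fun h => haS (h ▸ hiS)
            rw [hd1 i, if_neg hia] at hdi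
            exact Or.inr ⟨List.mem_cons_of_mem _ hiS, hdi⟩
        · rintro (hi | ⟨hiA, hdg⟩)
          · exact Or.inl (Or.inr hi)
          · rcases List.mem_cons.mp hiA with rfl | hiS
            · exact Or.inl (Or.inl rfl)
            · have hia : i ≠ a := fun h => haS (h ▸ hiS)
              exact Or.inr ⟨hiS, by rw [hd1 i, if_neg hia]; exact hdg⟩
    · have hc : ((dg.insert a (dg.getD a 0 - 1)).getD a 0 == 0) = false := by
        rw [hself]
        simp only [beq_eq_false_iff_ne, ne_eq]
        omega
      rw [if_neg (ne_true_of_eq_false hc)]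
      have hnotin1 : ∀ t ∈ S, t ∉ q := fun t ht => hnotin t (List.mem_cons_of_mem _ ht)
      obtain ⟨ih1, ih2, ih3⟩ := ih (dg.insert a (dg.getD a 0 - 1)) q hS hq hnotin1
      refine ⟨?_, ih2, ?_⟩
      · intro t
        rw [ih1 t, hd1 t]
        by_cases hta : t = a
        · subst hta; simp [haS]
        · simp [hta, List.mem_cons]
      · intro i
        rw [ih3 i]
        constructor
        · rintro (hi | ⟨hiS, hdi⟩)
          · exact Or.inl hi
          · have hia : i ≠ a := fun h => haS (h ▸ hiS)
            rw [hd1 i, if_neg hia] at hdi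
            exact Or.inr ⟨List.mem_cons_of_mem _ hiS, hdi⟩
        · rintro (hi | ⟨hiA, hdg⟩)
          · exact Or.inl hi
          · rcases List.mem_cons.mp hiA with rfl | hiS
            · exact absurd hdg hz
            · have hia : i ≠ a := fun h => haS (h ▸ hiS)
              exact Or.inr ⟨hiS, by rw [hd1 i, if_neg hia]; exact hdg⟩

-- B's decrement fold
lemma pvBDec_fold (S : List Int) (nlen : Nat) (hm : ∀ t ∈ S, 0 ≤ t ∧ t < (nlen : Int)) :
    ∀ (l : List Int), l.length = nlen → S.Nodup →
    ((S.foldl (fun dg t => PySem.List.pySetD dg t (PySem.List.pyGetD dg t 0 - 1)) l).length = nlen ∧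
     ∀ t, 0 ≤ t → PySem.List.pyGetD (S.foldl (fun dg t => PySem.List.pySetD dg t (PySem.List.pyGetD dg t 0 - 1)) l) t 0
        = if t ∈ S then PySem.List.pyGetD l t 0 - 1 else PySem.List.pyGetD l t 0) := by
  
  induction S with
  | nil => intro l hl _; exact ⟨hl, fun t _ => by simp⟩
  | cons a S ih =>
    intro l hl hnd
    obtain ⟨haS, hS⟩ := List.nodup_cons.mp hnd
    obtain ⟨ha0, ha1⟩ := hm a List.mem_cons_self
    simp only [List.foldl_cons]
    have hl1 : (PySem.List.pySetD l a (PySem.List.pyGetD l a 0 - 1)).length = nlen := by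
      rw [PySem.List.length_pySetD]; exact hl
    obtain ⟨hlen', hget⟩ := ih (fun t ht => hm t (List.mem_cons_of_mem _ ht)) _ hl1 hS
    refine ⟨hlen', ?_⟩
    intro t ht0
    rw [hget t ht0]
    have hsub : ∀ u, 0 ≤ u → PySem.List.pyGetD (PySem.List.pySetD l a (PySem.List.pyGetD l a 0 - 1)) u 0
        = if u = a then PySem.List.pyGetD l a 0 - 1 else PySem.List.pyGetD l u 0 := by
      intro u hu; exact pv_getD_setD l a u _ 0 ha0 (by omega) hu
    by_cases hta : t = a
    · subst hta
      simp [hsub t ht0, haS]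
    · simp only [List.mem_cons, hta, false_or]
      by_cases htS : t ∈ S <;> simp [htS, hsub t ht0, hta]

-- B's indeg/succ-building fold, split into components
lemma pv_foldl_pair_split {α β γ : Type} (l : List γ) (f : α → γ → α) (g : β → γ → β) (a : α) (b : β) :
    l.foldl (fun p e => (f p.1 e, g p.2 e)) (a, b) = (l.foldl f a, l.foldl g b) := by
  
  induction l generalizing a b with
  | nil => rfl
  | cons e l ih => simpa using ih (f a e) (g b e)

lemma pv_indeg_build (E : List (Int × Int)) (nlen : Nat)
    (hm : ∀ e ∈ E, 0 ≤ e.2 ∧ e.2 < (nlen : Int)) :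
    ∀ (l : List Int), l.length = nlen →
    ((E.foldl (fun dg e => PySem.List.pySetD dg e.2 (PySem.List.pyGetD dg e.2 0 + 1)) l).length = nlen ∧
     ∀ t, 0 ≤ t → PySem.List.pyGetD (E.foldl (fun dg e => PySem.List.pySetD dg e.2 (PySem.List.pyGetD dg e.2 0 + 1)) l) t 0
        = PySem.List.pyGetD l t 0 + (E.countP (fun e => e.2 == t) : Int)) := by
  
  induction E with
  | nil => intro l hl; exact ⟨hl, fun t _ => by simp⟩
  | cons e E ih =>
    intro l hl
    obtain ⟨he0, he1⟩ := hm e List.mem_cons_self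
    simp only [List.foldl_cons]
    have hl1 : (PySem.List.pySetD l e.2 (PySem.List.pyGetD l e.2 0 + 1)).length = nlen := by
      rw [PySem.List.length_pySetD]; exact hl
    obtain ⟨hlen', hget⟩ := ih (fun e' he' => hm e' (List.mem_cons_of_mem _ he')) _ hl1
    refine ⟨hlen', ?_⟩
    intro t ht0
    rw [hget t ht0, List.countP_cons]
    have hsub := pv_getD_setD l e.2 t (PySem.List.pyGetD l e.2 0 + 1) 0 he0 (by omega) ht0
    by_cases hte : t = e.2
    · subst hte
      simp only [hsub, beq_self_eq_true, if_pos]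
      push_cast; ring
    · have : (e.2 == t) = false := beq_eq_false_iff_ne.mpr (fun h => hte h.symm)
      simp only [hsub, if_neg hte, this, Bool.false_eq_true, if_false, add_zero]

lemma pv_succ_build (E : List (Int × Int)) (nlen : Nat)
    (hm : ∀ e ∈ E, 0 ≤ e.1 ∧ e.1 < (nlen : Int)) :
    ∀ (l : List (List Int)), l.length = nlen →
    ((E.foldl (fun sc e => PySem.List.pySetD sc e.1 (PySem.List.pyGetD sc e.1 [] ++ [e.2])) l).length = nlen ∧
     ∀ c, 0 ≤ c → PySem.List.pyGetD (E.foldl (fun sc e => PySem.List.pySetD sc e.1 (PySem.List.pyGetD sc e.1 [] ++ [e.2])) l) c []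
        = PySem.List.pyGetD l c [] ++ (E.filter (fun e => e.1 == c)).map (·.2)) := by
  
  induction E with
  | nil => intro l hl; exact ⟨hl, fun c _ => by simp⟩
  | cons e E ih =>
    intro l hl
    obtain ⟨he0, he1⟩ := hm e List.mem_cons_self
    simp only [List.foldl_cons]
    have hl1 : (PySem.List.pySetD l e.1 (PySem.List.pyGetD l e.1 [] ++ [e.2])).length = nlen := by
      rw [PySem.List.length_pySetD]; exact hl
    obtain ⟨hlen', hget⟩ := ih (fun e' he' => hm e' (List.mem_cons_of_mem _ he')) _ hl1
    refine ⟨hlen', ?_⟩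
    intro c hc0
    rw [hget c hc0, List.filter_cons]
    have hsub := pv_getD_setD l e.1 c (PySem.List.pyGetD l e.1 [] ++ [e.2]) [] he0 (by omega) hc0
    by_cases hce : c = e.1
    · subst hce
      simp only [hsub, beq_self_eq_true, if_pos, List.map_cons, List.append_assoc,
        List.singleton_append]
    · have : (e.1 == c) = false := beq_eq_false_iff_ne.mpr (fun h => hce h.symm)
      simp only [hsub, if_neg hce, this, Bool.false_eq_true, if_false]

lemma pv_S_nodup (E : List (Int × Int)) (cur : Int) (hnd : E.Nodup) :
    ((E.filter (fun e => e.1 == cur)).map (·.2)).Nodup := by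
  
  refine List.Nodup.map_on ?_ (hnd.filter _)
  intro e he e' he' hsnd
  have h1 : e.1 = cur := by simpa using (List.mem_filter.mp he).2
  have h2 : e'.1 = cur := by simpa using (List.mem_filter.mp he').2
  cases e; cases e'; simp_all

-- A's loop equals the middle loop
lemma pvALoop_eq_mloop (E : List (Int × Int)) (n : Int) (sa : PySem.Dict Int (PySem.Set Int))
    (hE : E.Nodup)
    (hrange : ∀ e ∈ E, 0 ≤ e.1 ∧ e.1 < n ∧ 0 ≤ e.2 ∧ e.2 < n ∧ e.1 ≠ e.2)
    (hsa : pvRsa sa E) :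
    ∀ (fuel : Nat) (dg : PySem.Dict Int Int) (q order : List Int) (deg : Int → Int),
    (∀ t, dg.getD t 0 = deg t) →
    q.Pairwise (· < ·) →
    (∀ i, i ∈ q ↔ (0 ≤ i ∧ i < n ∧ deg i = 0 ∧ i ∉ order)) →
    (∀ t, deg t = (E.countP (fun e => e.2 == t && decide (e.1 ∉ order)) : Int)) →
    (∀ i ∈ order, deg i ≤ 0) →
    pvALoop sa fuel dg q order = pvMLoop E n fuel deg order := by
  
  intro fuel
  induction fuel with
  | zero => intro dg q order deg _ _ _ _ _; rfl
  | succ fuel ih =>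
    intro dg q order deg hdeg hqp hqmem hJ4 hJ5
    cases q with
    | nil =>
      have hfind : (PySem.List.pyRange 0 n 1).find? (fun i => decide (i ∉ order) && (deg i == 0)) = none := by
        rw [List.find?_eq_none]
        intro x hx hp
        rw [PySem.List.mem_pyRange_one] at hx
        simp only [Bool.and_eq_true, decide_eq_true_eq, beq_iff_eq] at hp
        exact absurd ((hqmem x).mpr ⟨hx.1, hx.2, hp.2, hp.1⟩) (List.not_mem_nil)
      simp only [pvALoop, pvMLoop, hfind]
    | cons cur rest =>
      obtain ⟨h0c, h1c, hdc, hoc⟩ := (hqmem cur).mp List.mem_cons_self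
      have hfind : (PySem.List.pyRange 0 n 1).find? (fun i => decide (i ∉ order) && (deg i == 0)) = some cur := by
        refine pv_find?_pyRange_least n _ cur h0c h1c (by simp [hoc, hdc]) ?_
        intro j hj0 hjm
        rw [Bool.eq_false_iff]
        intro hptrue
        simp only [Bool.and_eq_true, decide_eq_true_eq, beq_iff_eq] at hptrue
        have hjq : j ∈ cur :: rest := (hqmem j).mpr ⟨hj0, lt_trans hjm h1c, hptrue.2, hptrue.1⟩
        rcases List.mem_cons.mp hjq with rfl | hjr
        · omega
        · have := List.rel_of_pairwise_cons hqp hjr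
          omega
      simp only [pvALoop, pvMLoop, hfind]
      have hSmem : ∀ t, t ∈ PySem.List.sorted (sa.getD cur PySem.Set.empty) (fun x => x) false ↔ (cur, t) ∈ E := by
        intro t
        rw [PySem.List.mem_sorted, hsa cur, pv_mem_filter_map]
      have hSnd : (PySem.List.sorted (sa.getD cur PySem.Set.empty) (fun x => x) false).Nodup := by
        refine ((PySem.List.sorted_perm (sa.getD cur PySem.Set.empty) (fun x => x) false).nodup_iff).mpr ?_
        rw [hsa cur]
        exact pv_S_nodup E cur hE
      have hdegpos : ∀ t, (cur, t) ∈ E → 1 ≤ deg t := by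
        intro t hmem
        rw [hJ4 t]
        have : 0 < E.countP (fun e => e.2 == t && decide (e.1 ∉ order)) :=
          List.countP_pos_iff.mpr ⟨(cur, t), hmem, by simp [hoc]⟩
        omega
      have hnotin : ∀ t ∈ PySem.List.sorted (sa.getD cur PySem.Set.empty) (fun x => x) false, t ∉ rest := by
        intro t ht hrest
        have h1 := hdegpos t ((hSmem t).mp ht)
        have h2 := ((hqmem t).mp (List.mem_cons_of_mem _ hrest)).2.2.1
        omega
      obtain ⟨hA1, hA2, hA3⟩ := pvAStep_fold (PySem.List.sorted (sa.getD cur PySem.Set.empty) (fun x => x) false)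
        dg rest hSnd (List.Pairwise.of_cons hqp) hnotin
      refine ih _ _ _ _ ?_ hA2 ?_ ?_ ?_
      · intro t
        rw [hA1 t, hdeg t]
        by_cases hmem : (cur, t) ∈ E
        · rw [if_pos ((hSmem t).mpr hmem), if_pos hmem]
        · rw [if_neg (fun h => hmem ((hSmem t).mp h)), if_neg hmem]
      · intro i
        rw [hA3 i]
        constructor
        · rintro (hirest | ⟨hiS, hdg1⟩)
          · obtain ⟨hi0, hi1, hid0, hio⟩ := (hqmem i).mp (List.mem_cons_of_mem _ hirest)
            have hicur : cur < i := List.rel_of_pairwise_cons hqp hirest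
            have hnotE : (cur, i) ∉ E := fun hmem => by have := hdegpos i hmem; omega
            refine ⟨hi0, hi1, ?_, ?_⟩
            · rw [if_neg hnotE]; exact hid0
            · intro hmem
              rcases List.mem_append.mp hmem with h | h
              · exact hio h
              · rw [List.mem_singleton] at h; omega
          · have hcurE : (cur, i) ∈ E := (hSmem i).mp hiS
            obtain ⟨_, _, hi0, hi1, hne⟩ := hrange _ hcurE
            have hdgi : deg i = 1 := by rw [← hdeg i]; exact hdg1
            refine ⟨hi0, hi1, ?_, ?_⟩
            · rw [if_pos hcurE]; omega
            · intro hmem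
              rcases List.mem_append.mp hmem with h | h
              · have := hJ5 i h; omega
              · rw [List.mem_singleton] at h
                exact hne (by rw [h])
        · rintro ⟨hi0, hi1, hdeg0, hnord⟩
          have hicur : i ≠ cur := fun h =>
            hnord (List.mem_append.mpr (Or.inr (by rw [h]; exact List.mem_cons_self)))
          have hio : i ∉ order := fun h => hnord (List.mem_append.mpr (Or.inl h))
          by_cases hmem : (cur, i) ∈ E
          · refine Or.inr ⟨(hSmem i).mpr hmem, ?_⟩
            rw [if_pos hmem] at hdeg0
            rw [hdeg i]
            omega
          · rw [if_neg hmem] at hdeg0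
            have hiq : i ∈ cur :: rest := (hqmem i).mpr ⟨hi0, hi1, hdeg0, hio⟩
            exact Or.inl ((List.mem_cons.mp hiq).resolve_left hicur)
      · intro t
        have hcongr : ∀ e ∈ E, (e.2 == t && decide (e.1 ∉ order ++ [cur]))
            = ((e.2 == t && decide (e.1 ∉ order)) && !(e == (cur, t))) := by
          intro e _
          obtain ⟨a, b⟩ := e
          by_cases hbt : b = t
          · subst hbt
            by_cases hac : a = cur
            · subst hac
              simp [List.mem_append, hoc]
            · simp [List.mem_append, hac, Prod.ext_iff]
          · have hb : (b == t) = false := beq_eq_false_iff_ne.mpr hbt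
            simp [hb]
        have hrw : E.countP (fun e => e.2 == t && decide (e.1 ∉ order ++ [cur]))
            = E.countP (fun e => (e.2 == t && decide (e.1 ∉ order)) && !(e == (cur, t))) :=
          List.countP_congr (fun e he => by rw [hcongr e he])
        show (if (cur, t) ∈ E then deg t - 1 else deg t) = _
        rw [hrw, pv_countP_sub E (fun e => e.2 == t && decide (e.1 ∉ order)) (cur, t) (by simp [hoc]) hE]
        by_cases hmem : (cur, t) ∈ E <;> simp [hmem, hJ4 t]
      · intro i hi
        rcases List.mem_append.mp hi with h | h
        · have := hJ5 i h
          show (if (cur, i) ∈ E then deg i - 1 else deg i) ≤ 0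
          by_cases hmem : (cur, i) ∈ E
          · rw [if_pos hmem]; omega
          · rw [if_neg hmem]; omega
        · rw [List.mem_singleton] at h
          have hnE : (cur, cur) ∉ E := fun hmem => (hrange _ hmem).2.2.2.2 rfl
          show (if (cur, i) ∈ E then deg i - 1 else deg i) ≤ 0
          rw [h, if_neg hnE]
          omega

-- B's loop equals the middle loop
lemma pvBLoop_eq_mloop (E : List (Int × Int)) (nlen : Nat) (succ : List (List Int))
    (hE : E.Nodup)
    (hrange : ∀ e ∈ E, 0 ≤ e.1 ∧ e.1 < (nlen : Int) ∧ 0 ≤ e.2 ∧ e.2 < (nlen : Int) ∧ e.1 ≠ e.2)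
    (hsucc : ∀ c, 0 ≤ c → c < (nlen : Int) → PySem.List.pyGetD succ c [] = (E.filter (fun e => e.1 == c)).map (·.2)) :
    ∀ (fuel : Nat) (indeg : List Int) (done : List Bool) (order : List Int) (deg : Int → Int),
    indeg.length = nlen → done.length = nlen →
    (∀ t, 0 ≤ t → t < (nlen : Int) → PySem.List.pyGetD indeg t 0 = deg t) →
    (∀ i, 0 ≤ i → i < (nlen : Int) → (PySem.List.pyGetD done i false = decide (i ∈ order))) →
    pvBLoop succ (nlen : Int) fuel indeg done order = pvMLoop E (nlen : Int) fuel deg order := by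
  
  intro fuel
  induction fuel with
  | zero => intro indeg done order deg _ _ _ _; rfl
  | succ fuel ih =>
    intro indeg done order deg hlen1 hlen2 hdeg hdone
    have hfind : (PySem.List.pyRange 0 (nlen : Int) 1).find? (fun i =>
        !(PySem.List.pyGetD done i false) && (PySem.List.pyGetD indeg i 0 == 0))
        = (PySem.List.pyRange 0 (nlen : Int) 1).find? (fun i => decide (i ∉ order) && (deg i == 0)) := by
      refine pv_find?_congr _ _ _ ?_
      intro i hi
      rw [PySem.List.mem_pyRange_one] at hi
      rw [hdone i hi.1 hi.2, hdeg i hi.1 hi.2]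
      simp [decide_not]
    simp only [pvBLoop, pvMLoop, hfind]
    rcases hres : (PySem.List.pyRange 0 (nlen : Int) 1).find? (fun i => decide (i ∉ order) && (deg i == 0)) with _ | cur
    · rfl
    · have hcurmem : cur ∈ PySem.List.pyRange 0 (nlen : Int) 1 := List.mem_of_find?_eq_some hres
      rw [PySem.List.mem_pyRange_one] at hcurmem
      have hp := List.find?_some hres
      simp only [Bool.and_eq_true, decide_eq_true_eq, beq_iff_eq] at hp
      have hsucceq := hsucc cur hcurmem.1 hcurmem.2
      have hSmem : ∀ t, t ∈ PySem.List.pyGetD succ cur [] ↔ (cur, t) ∈ E := by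
        intro t; rw [hsucceq, pv_mem_filter_map]
      have hSnd : (PySem.List.pyGetD succ cur []).Nodup := by
        rw [hsucceq]; exact pv_S_nodup E cur hE
      have hSbound : ∀ t ∈ PySem.List.pyGetD succ cur [], 0 ≤ t ∧ t < (nlen : Int) := by
        intro t ht
        have := hrange _ ((hSmem t).mp ht)
        exact ⟨this.2.2.1, this.2.2.2.1⟩
      obtain ⟨hlen1', hget⟩ := pvBDec_fold (PySem.List.pyGetD succ cur []) nlen hSbound indeg hlen1 hSnd
      refine ih _ _ _ _ hlen1' (by rw [PySem.List.length_pySetD]; exact hlen2) ?_ ?_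
      · intro t ht0 ht1
        rw [hget t ht0, hdeg t ht0 ht1]
        by_cases hmem : (cur, t) ∈ E
        · rw [if_pos ((hSmem t).mpr hmem), if_pos hmem]
        · rw [if_neg (fun h => hmem ((hSmem t).mp h)), if_neg hmem]
      · intro i hi0 hi1
        have hcl : cur < (done.length : Int) := by rw [hlen2]; exact hcurmem.2
        rw [pv_getD_setD done cur i true false hcurmem.1 hcl hi0]
        by_cases hic : i = cur
        · subst hic
          simp [List.mem_append]
        · rw [if_neg hic, hdone i hi0 hi1]
          simp [List.mem_append, hic]

-- ===== VERDICT (by name: the statement is the Claim_ definition above) =====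
theorem topo_sort_sccs_py_spec : Claim_equal_topo_sort_sccs_py := by
  intro sccs adj _
  unfold Spec_topo_sort_sccs_py
  have hEnd : (pvEdges (pvSccOf sccs) adj).Nodup := pvEdges_nodup _ _
  have hrange : ∀ e ∈ pvEdges (pvSccOf sccs) adj,
      0 ≤ e.1 ∧ e.1 < (sccs.length : Int) ∧ 0 ≤ e.2 ∧ e.2 < (sccs.length : Int) ∧ e.1 ≠ e.2 :=
    fun e he => pvEdges_mem sccs adj e he
  -- A's condensation state vs the edge set
  have hsa0 : pvRsa ((PySem.List.pyRange 0 (sccs.length : Int) 1).foldl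
      (fun d i => d.insert i PySem.Set.empty) PySem.Dict.empty) [] := by
    intro c
    rw [pv_getD_fold_const _ _ _ (fun c => PySem.Dict.getD_empty c _) c]
    rfl
  have hid0 : pvRid ((PySem.List.pyRange 0 (sccs.length : Int) 1).foldl
      (fun d i => d.insert i (0 : Int)) PySem.Dict.empty) [] := by
    intro t
    rw [pv_getD_fold_const _ _ _ (fun c => PySem.Dict.getD_empty c _) t]
    rfl
  obtain ⟨hsa, hid⟩ := pvCond_char (pvSccOf sccs) adj _ _ PySem.Set.empty hsa0 hid0
  have hsa' : pvRsa (adj.foldl (pvCondStep (pvSccOf sccs))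
      ((PySem.List.pyRange 0 (sccs.length : Int) 1).foldl (fun d i => d.insert i PySem.Set.empty) PySem.Dict.empty,
       (PySem.List.pyRange 0 (sccs.length : Int) 1).foldl (fun d i => d.insert i (0 : Int)) PySem.Dict.empty)).1
      (pvEdges (pvSccOf sccs) adj) := hsa
  have hid' : pvRid (adj.foldl (pvCondStep (pvSccOf sccs))
      ((PySem.List.pyRange 0 (sccs.length : Int) 1).foldl (fun d i => d.insert i PySem.Set.empty) PySem.Dict.empty,
       (PySem.List.pyRange 0 (sccs.length : Int) 1).foldl (fun d i => d.insert i (0 : Int)) PySem.Dict.empty)).2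
      (pvEdges (pvSccOf sccs) adj) := hid
  -- the abstract in-degree function
  -- A-side: the initial queue is the (already sorted) filter of range(n)
  have hfp : (((PySem.List.pyRange 0 (sccs.length : Int) 1).filter
      (fun i => (adj.foldl (pvCondStep (pvSccOf sccs))
        ((PySem.List.pyRange 0 (sccs.length : Int) 1).foldl (fun d i => d.insert i PySem.Set.empty) PySem.Dict.empty,
         (PySem.List.pyRange 0 (sccs.length : Int) 1).foldl (fun d i => d.insert i (0 : Int)) PySem.Dict.empty)).2.getD i 0 == 0))).Pairwise (· < ·) :=
    List.Pairwise.filter _ (PySem.List.pairwise_lt_pyRange_one 0 (sccs.length : Int))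
  have hsorted := PySem.List.sorted_eq_self_of_pairwise
    ((PySem.List.pyRange 0 (sccs.length : Int) 1).filter
      (fun i => (adj.foldl (pvCondStep (pvSccOf sccs))
        ((PySem.List.pyRange 0 (sccs.length : Int) 1).foldl (fun d i => d.insert i PySem.Set.empty) PySem.Dict.empty,
         (PySem.List.pyRange 0 (sccs.length : Int) 1).foldl (fun d i => d.insert i (0 : Int)) PySem.Dict.empty)).2.getD i 0 == 0))
    (fun x => x) (hfp.imp le_of_lt)
  have hqmem : ∀ i, i ∈ ((PySem.List.pyRange 0 (sccs.length : Int) 1).filter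
      (fun i => (adj.foldl (pvCondStep (pvSccOf sccs))
        ((PySem.List.pyRange 0 (sccs.length : Int) 1).foldl (fun d i => d.insert i PySem.Set.empty) PySem.Dict.empty,
         (PySem.List.pyRange 0 (sccs.length : Int) 1).foldl (fun d i => d.insert i (0 : Int)) PySem.Dict.empty)).2.getD i 0 == 0))
      ↔ 0 ≤ i ∧ i < (sccs.length : Int) ∧
        (((pvEdges (pvSccOf sccs) adj).countP (fun e => e.2 == i) : Int) = 0) ∧ i ∉ ([] : List Int) := by
    intro i
    rw [List.mem_filter, PySem.List.mem_pyRange_one]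
    constructor
    · rintro ⟨⟨h1, h2⟩, h3⟩
      rw [hid' i] at h3
      exact ⟨h1, h2, by simpa using h3, List.not_mem_nil⟩
    · rintro ⟨h1, h2, h3, _⟩
      exact ⟨⟨h1, h2⟩, by rw [hid' i]; simpa using h3⟩
  have hJ4 : ∀ t : Int, (((pvEdges (pvSccOf sccs) adj).countP (fun e => e.2 == t) : Int))
      = (((pvEdges (pvSccOf sccs) adj).countP (fun e => e.2 == t && decide (e.1 ∉ ([] : List Int)))) : Int) := by
    intro t
    congr 1
    exact List.countP_congr (fun e _ => by simp)
  have hA := pvALoop_eq_mloop (pvEdges (pvSccOf sccs) adj) (sccs.length : Int)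
    (adj.foldl (pvCondStep (pvSccOf sccs))
      ((PySem.List.pyRange 0 (sccs.length : Int) 1).foldl (fun d i => d.insert i PySem.Set.empty) PySem.Dict.empty,
       (PySem.List.pyRange 0 (sccs.length : Int) 1).foldl (fun d i => d.insert i (0 : Int)) PySem.Dict.empty)).1
    hEnd hrange hsa' (sccs.length + 1)
    (adj.foldl (pvCondStep (pvSccOf sccs))
      ((PySem.List.pyRange 0 (sccs.length : Int) 1).foldl (fun d i => d.insert i PySem.Set.empty) PySem.Dict.empty,
       (PySem.List.pyRange 0 (sccs.length : Int) 1).foldl (fun d i => d.insert i (0 : Int)) PySem.Dict.empty)).2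
    ((PySem.List.pyRange 0 (sccs.length : Int) 1).filter
      (fun i => (adj.foldl (pvCondStep (pvSccOf sccs))
        ((PySem.List.pyRange 0 (sccs.length : Int) 1).foldl (fun d i => d.insert i PySem.Set.empty) PySem.Dict.empty,
         (PySem.List.pyRange 0 (sccs.length : Int) 1).foldl (fun d i => d.insert i (0 : Int)) PySem.Dict.empty)).2.getD i 0 == 0))
    [] (fun t => (((pvEdges (pvSccOf sccs) adj).countP (fun e => e.2 == t) : Int)))
    (fun t => hid' t) hfp hqmem hJ4 (by intro i hi; cases hi)
  -- B-side: split the pair fold, characterise indeg / succ lists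
  have hsplit : (pvEdges (pvSccOf sccs) adj).foldl
      (fun (st : List Int × List (List Int)) e =>
        (PySem.List.pySetD st.1 e.2 (PySem.List.pyGetD st.1 e.2 0 + 1),
         PySem.List.pySetD st.2 e.1 (PySem.List.pyGetD st.2 e.1 [] ++ [e.2])))
      (List.replicate sccs.length 0, List.replicate sccs.length [])
      = ((pvEdges (pvSccOf sccs) adj).foldl
          (fun dg e => PySem.List.pySetD dg e.2 (PySem.List.pyGetD dg e.2 0 + 1)) (List.replicate sccs.length 0),
         (pvEdges (pvSccOf sccs) adj).foldl
          (fun sc e => PySem.List.pySetD sc e.1 (PySem.List.pyGetD sc e.1 [] ++ [e.2])) (List.replicate sccs.length [])) :=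
    pv_foldl_pair_split (pvEdges (pvSccOf sccs) adj)
      (fun dg e => PySem.List.pySetD dg e.2 (PySem.List.pyGetD dg e.2 0 + 1))
      (fun sc e => PySem.List.pySetD sc e.1 (PySem.List.pyGetD sc e.1 [] ++ [e.2]))
      (List.replicate sccs.length 0) (List.replicate sccs.length [])
  obtain ⟨hlen1, hgetind⟩ := pv_indeg_build (pvEdges (pvSccOf sccs) adj) sccs.length
    (fun e he => ⟨(hrange e he).2.2.1, (hrange e he).2.2.2.1⟩)
    (List.replicate sccs.length 0) (List.length_replicate)
  obtain ⟨hlen2, hgetsucc⟩ := pv_succ_build (pvEdges (pvSccOf sccs) adj) sccs.length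
    (fun e he => ⟨(hrange e he).1, (hrange e he).2.1⟩)
    (List.replicate sccs.length []) (List.length_replicate)
  have hB := pvBLoop_eq_mloop (pvEdges (pvSccOf sccs) adj) sccs.length
    ((pvEdges (pvSccOf sccs) adj).foldl
      (fun sc e => PySem.List.pySetD sc e.1 (PySem.List.pyGetD sc e.1 [] ++ [e.2])) (List.replicate sccs.length []))
    hEnd hrange
    (by
      intro c hc0 hc1
      rw [hgetsucc c hc0, pv_getD_replicate sccs.length ([] : List Int) c hc0]
      simp)
    (sccs.length + 1)
    ((pvEdges (pvSccOf sccs) adj).foldl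
      (fun dg e => PySem.List.pySetD dg e.2 (PySem.List.pyGetD dg e.2 0 + 1)) (List.replicate sccs.length 0))
    (List.replicate sccs.length false) []
    (fun t => (((pvEdges (pvSccOf sccs) adj).countP (fun e => e.2 == t) : Int)))
    hlen1 (List.length_replicate)
    (by
      intro t ht0 _
      rw [hgetind t ht0, pv_getD_replicate sccs.length (0 : Int) t ht0]
      simp)
    (by
      intro i hi0 _
      rw [pv_getD_replicate sccs.length false i hi0]
      simp)
  -- assemble
  have hAeq : topo_sort_sccs_py sccs adj
      = (pvALoop
          (adj.foldl (pvCondStep (pvSccOf sccs))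
            ((PySem.List.pyRange 0 (sccs.length : Int) 1).foldl (fun d i => d.insert i PySem.Set.empty) PySem.Dict.empty,
             (PySem.List.pyRange 0 (sccs.length : Int) 1).foldl (fun d i => d.insert i (0 : Int)) PySem.Dict.empty)).1
          (sccs.length + 1)
          (adj.foldl (pvCondStep (pvSccOf sccs))
            ((PySem.List.pyRange 0 (sccs.length : Int) 1).foldl (fun d i => d.insert i PySem.Set.empty) PySem.Dict.empty,
             (PySem.List.pyRange 0 (sccs.length : Int) 1).foldl (fun d i => d.insert i (0 : Int)) PySem.Dict.empty)).2
          (PySem.List.sorted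
            ((PySem.List.pyRange 0 (sccs.length : Int) 1).filter
              (fun i => (adj.foldl (pvCondStep (pvSccOf sccs))
                ((PySem.List.pyRange 0 (sccs.length : Int) 1).foldl (fun d i => d.insert i PySem.Set.empty) PySem.Dict.empty,
                 (PySem.List.pyRange 0 (sccs.length : Int) 1).foldl (fun d i => d.insert i (0 : Int)) PySem.Dict.empty)).2.getD i 0 == 0))
            (fun x => x) false)
          []).map (fun i => PySem.List.pyGetD sccs i []) := rfl
  have hBeq : topo_sort_sccs_py_alt sccs adj
      = (pvBLoop
          ((pvEdges (pvSccOf sccs) adj).foldl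
            (fun sc e => PySem.List.pySetD sc e.1 (PySem.List.pyGetD sc e.1 [] ++ [e.2])) (List.replicate sccs.length []))
          (sccs.length : Int) (sccs.length + 1)
          ((pvEdges (pvSccOf sccs) adj).foldl
            (fun dg e => PySem.List.pySetD dg e.2 (PySem.List.pyGetD dg e.2 0 + 1)) (List.replicate sccs.length 0))
          (List.replicate sccs.length false) []).map (fun i => PySem.List.pyGetD sccs i []) := by
    show (pvBLoop
        ((pvEdges (pvSccOf sccs) adj).foldl
          (fun (st : List Int × List (List Int)) e =>
            (PySem.List.pySetD st.1 e.2 (PySem.List.pyGetD st.1 e.2 0 + 1),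
             PySem.List.pySetD st.2 e.1 (PySem.List.pyGetD st.2 e.1 [] ++ [e.2])))
          (List.replicate sccs.length 0, List.replicate sccs.length [])).2
        (sccs.length : Int) (sccs.length + 1)
        ((pvEdges (pvSccOf sccs) adj).foldl
          (fun (st : List Int × List (List Int)) e =>
            (PySem.List.pySetD st.1 e.2 (PySem.List.pyGetD st.1 e.2 0 + 1),
             PySem.List.pySetD st.2 e.1 (PySem.List.pyGetD st.2 e.1 [] ++ [e.2])))
          (List.replicate sccs.length 0, List.replicate sccs.length [])).1
        (List.replicate sccs.length false) []).map (fun i => PySem.List.pyGetD sccs i []) = _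
    rw [hsplit]
  rw [hAeq, hBeq, hsorted, hA, hB]
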